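-- pv_equiv track=rewrite | github.com/gurfinkel/codeSignal | tournaments/rightmostRoundNumber/rightmostRoundNumber.py | rightmostRoundNumber
-- ===== SOURCE A (Python) =====
-- def rightmostRoundNumber(inputArray):
--     x = 0
--     n = 0
--     f = False
--
--     while len(inputArray) > x:
--         if inputArray[x] % 10 == 0:
--             n = x
--             f = True
--         x += 1
--     if f:
--         return n
--     return -1
-- ===== SOURCE B (Python) =====
-- def rightmostRoundNumber(inputArray):
--     for i in range(len(inputArray) - 1, -1, -1):
--         if inputArray[i] % 10 == 0:
--             return i
--     return -1
-- ===== Notes on version B (the rewrite author's own statement) =====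
-- stated objective: simpler
-- what changed: Replaces A's full forward pass with a flag and last-match accumulator by a reverse scan that returns the first (i.e. rightmost) index divisible by 10 immediately.
import Mathlib
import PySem

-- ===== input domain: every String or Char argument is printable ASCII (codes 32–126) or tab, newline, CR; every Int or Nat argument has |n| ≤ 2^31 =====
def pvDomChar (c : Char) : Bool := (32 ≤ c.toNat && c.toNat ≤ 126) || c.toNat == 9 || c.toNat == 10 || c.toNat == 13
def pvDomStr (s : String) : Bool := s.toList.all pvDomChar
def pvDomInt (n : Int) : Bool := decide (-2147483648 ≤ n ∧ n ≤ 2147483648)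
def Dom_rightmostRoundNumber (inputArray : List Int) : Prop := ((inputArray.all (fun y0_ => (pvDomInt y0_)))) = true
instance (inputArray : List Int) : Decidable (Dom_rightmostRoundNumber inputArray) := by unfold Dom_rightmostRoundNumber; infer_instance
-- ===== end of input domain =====

-- B replaces A's full forward pass (flag + last-match accumulator) by a reverse scan with early exit; objective: simpler.

-- ===== PORT A =====
-- A's while-loop over index x with state (n, f); iterating the index over the list is
-- transliterated as structural recursion over the remaining suffix, carrying x.
def rightmostRoundNumberGoA : List Int → Int → Int → Bool → Int
  | [], _, n, f => if f then n else -1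
  | a :: t, x, n, f =>
      if PySem.Int.mod a 10 == 0 then rightmostRoundNumberGoA t (x + 1) x true
      else rightmostRoundNumberGoA t (x + 1) n f

def rightmostRoundNumber (inputArray : List Int) : Int :=
  rightmostRoundNumberGoA inputArray 0 0 false

-- ===== PORT B =====
-- B's 'for i in range(len-1, -1, -1)' with early return: recursion on the count of
-- remaining indices; at fuel i+1 the current Python index is i.
def rightmostRoundNumberGoB (inputArray : List Int) : Nat → Int
  | 0 => -1
  | i + 1 =>
      if PySem.Int.mod ((PySem.List.pyGet? inputArray (i : Int)).getD 0) 10 == 0 then (i : Int)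
      else rightmostRoundNumberGoB inputArray i

def rightmostRoundNumber_alt (inputArray : List Int) : Int :=
  rightmostRoundNumberGoB inputArray inputArray.length

-- ===== PRECONDITION & SPEC =====
def Spec_rightmostRoundNumber (inputArray : List Int) (out : Int) : Prop := out = rightmostRoundNumber_alt inputArray
instance (inputArray : List Int) (out : Int) : Decidable (Spec_rightmostRoundNumber inputArray out) := by unfold Spec_rightmostRoundNumber; infer_instance

-- ===== CLAIM (what is proved, stated in full; the proofs are below) =====
def Claim_equal_rightmostRoundNumber : Prop := ∀ (inputArray : List Int), Dom_rightmostRoundNumber inputArray → Spec_rightmostRoundNumber inputArray (rightmostRoundNumber inputArray)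

-- ===== LEMMAS AND PROOFS =====

-- Index (as Int) of the last element divisible by 10, if any.
def pvLastIdx : List Int → Option Int
  | [] => none
  | a :: t =>
      match pvLastIdx t with
      | some j => some (j + 1)
      | none => if PySem.Int.mod a 10 == 0 then some 0 else none

theorem pvGoA_eq (t : List Int) : ∀ (x n : Int) (f : Bool),
    rightmostRoundNumberGoA t x n f =
      match pvLastIdx t with
      | some j => x + j
      | none => if f then n else -1 := by
  induction t with
  | nil => intro x n f; simp [rightmostRoundNumberGoA, pvLastIdx]
  | cons a t ih =>
    intro x n f
    cases hl : pvLastIdx t with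
    | some j =>
      by_cases h : Int.fmod a 10 = 0 <;>
        simp [rightmostRoundNumberGoA, pvLastIdx, PySem.Int.mod, h, ih, hl] <;> ring
    | none =>
      by_cases h : Int.fmod a 10 = 0 <;>
        simp [rightmostRoundNumberGoA, pvLastIdx, PySem.Int.mod, h, ih, hl]

theorem pvLastIdx_append_singleton (ys : List Int) (a : Int) :
    pvLastIdx (ys ++ [a]) =
      if PySem.Int.mod a 10 == 0 then some (ys.length : Int) else pvLastIdx ys := by
  induction ys with
  | nil => simp [pvLastIdx]
  | cons b ys ih =>
    cases hl : pvLastIdx ys with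
    | some j =>
      by_cases h : Int.fmod a 10 = 0 <;>
        simp [List.cons_append, pvLastIdx, PySem.Int.mod, h, ih, hl]
    | none =>
      by_cases h : Int.fmod a 10 = 0 <;>
        simp [List.cons_append, pvLastIdx, PySem.Int.mod, h, ih, hl]

theorem pvGoB_eq (xs : List Int) : ∀ (k : Nat), k ≤ xs.length →
    rightmostRoundNumberGoB xs k =
      match pvLastIdx (xs.take k) with
      | some j => j
      | none => -1 := by
  intro k
  induction k with
  | zero => intro _; simp [rightmostRoundNumberGoB, pvLastIdx]
  | succ i ih =>
    intro hk
    have hi : i < xs.length := by omega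
    have htake : xs.take (i + 1) = xs.take i ++ [xs[i]] := by
      rw [List.take_add_one, List.getElem?_eq_getElem hi]; rfl
    have hget : PySem.List.pyGet? xs (i : Int) = some xs[i] := by
      rw [PySem.List.pyGet?_natCast, List.getElem?_eq_getElem hi]
    simp only [rightmostRoundNumberGoB, htake, pvLastIdx_append_singleton, hget,
      Option.getD_some, List.length_take, Nat.min_eq_left (Nat.le_of_lt hi),
      PySem.Int.mod, beq_iff_eq]
    by_cases h : Int.fmod xs[i] 10 = 0 <;>
      simp [h, ih (Nat.le_of_lt hi)]

-- ===== VERDICT (by name: the statement is the Claim_ definition above) =====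
theorem rightmostRoundNumber_spec : Claim_equal_rightmostRoundNumber := by
  intro xs _
  unfold Spec_rightmostRoundNumber rightmostRoundNumber rightmostRoundNumber_alt
  rw [pvGoA_eq, pvGoB_eq xs xs.length (le_refl _), List.take_length]
  cases hl : pvLastIdx xs <;> simp
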